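-- pv_equiv track=rewrite | github.com/MoriGrey/-YouTube-SEO-Tool | src/modules/tag_suggester.py | _rank_tags
-- ===== SOURCE A (Python) =====
-- from typing import Dict, Any, List, Optional
--
-- def _rank_tags(tags: List[str], max_tags: int) -> List[str]:
--     """Rank tags by relevance and importance."""
--     # Remove duplicates while preserving order
--     seen = set()
--     unique_tags = []
--     for tag in tags:
--         tag_lower = tag.lower()
--         if tag_lower not in seen:
--             seen.add(tag_lower)
--             unique_tags.append(tag)
--
--     # Score tags
--     scored_tags = []
--     for tag in unique_tags:
--         score = 0
--         tag_lower = tag.lower()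
--
--         # Base keywords get higher score
--         if any(kw in tag_lower for kw in ["psychedelic", "anatolian", "rock", "turkish", "70s"]):
--             score += 10
--
--         # Length score (optimal: 2-3 words)
--         word_count = len(tag.split())
--         if 2 <= word_count <= 3:
--             score += 5
--         elif word_count == 1:
--             score += 3
--
--         # Character length (optimal: 10-30 chars)
--         char_len = len(tag)
--         if 10 <= char_len <= 30:
--             score += 3
--
--         scored_tags.append((tag, score))
--
--     # Sort by score
--     scored_tags.sort(key=lambda x: x[1], reverse=True)
--
--     # Return top tags
--     return [tag for tag, score in scored_tags[:max_tags]]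
-- ===== SOURCE B (Python) =====
-- KEYWORDS = ("psychedelic", "anatolian", "rock", "turkish", "70s")
-- SCORES_DESC = (18, 16, 15, 13, 10, 8, 6, 5, 3, 0)
--
--
-- def _score(tag):
--     low = tag.lower()
--     words = len(tag.split())
--     return ((10 if any(kw in low for kw in KEYWORDS) else 0)
--             + (5 if 2 <= words <= 3 else 3 if words == 1 else 0)
--             + (3 if 10 <= len(tag) <= 30 else 0))
--
--
-- def _rank_tags(tags, max_tags):
--     # One pass: dedup case-insensitively and drop each kept tag into its
--     # score bucket; scores form a fixed small set, so a descending walk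
--     # over the buckets replaces the comparison sort (stable by append order).
--     seen = set()
--     buckets = {}
--     for tag in tags:
--         low = tag.lower()
--         if low in seen:
--             continue
--         seen.add(low)
--         buckets.setdefault(_score(tag), []).append(tag)
--     ranked = []
--     for s in SCORES_DESC:
--         ranked.extend(buckets.get(s, ()))
--     return ranked[:max_tags]
-- ===== Notes on version B (the rewrite author's own statement) =====
-- stated objective: alternative
-- what changed: Replaces A's build-scored-pairs-then-stable-reverse-sort-then-slice with a single dedup-and-score pass that appends each kept tag to a score bucket (dict), then reads the buckets out in fixed descending score order before slicing; append order per bucket reproduces the stable sort's tie order.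
import Mathlib
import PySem

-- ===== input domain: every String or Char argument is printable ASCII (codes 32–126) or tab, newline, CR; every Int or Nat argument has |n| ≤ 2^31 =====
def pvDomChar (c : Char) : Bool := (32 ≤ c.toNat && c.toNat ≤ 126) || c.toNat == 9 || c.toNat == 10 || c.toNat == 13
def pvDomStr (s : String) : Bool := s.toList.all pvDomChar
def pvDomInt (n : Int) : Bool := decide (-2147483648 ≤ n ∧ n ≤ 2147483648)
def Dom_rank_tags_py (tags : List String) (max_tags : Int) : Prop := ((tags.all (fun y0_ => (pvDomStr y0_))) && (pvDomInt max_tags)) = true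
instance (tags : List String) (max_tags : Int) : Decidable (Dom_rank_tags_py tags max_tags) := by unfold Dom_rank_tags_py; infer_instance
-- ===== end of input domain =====

-- B replaces A's stable reverse sort of scored tags with score buckets filled in
-- one dedup-and-score pass and read out in fixed descending score order (alternative).

-- ===== PORT A =====
-- loop bodies of A, named for the proofs; each is a literal transcription of its loop body
def pvDedupStepA (st : PySem.Set String × List String) (tag : String) : PySem.Set String × List String :=
  let tag_lower := PySem.Str.lower tag
  if st.1.contains tag_lower then st else (st.1.add tag_lower, st.2 ++ [tag])

def pvScoreStepA (acc : List (String × Int)) (tag : String) : List (String × Int) :=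
  let score : Int := 0
  let tag_lower := PySem.Str.lower tag
  let score := if (["psychedelic", "anatolian", "rock", "turkish", "70s"] : List String).any
      (fun kw => PySem.Str.isIn kw tag_lower) then score + 10 else score
  let word_count := (PySem.Str.split₀ tag).length
  let score := if 2 ≤ word_count ∧ word_count ≤ 3 then score + 5
    else if word_count = 1 then score + 3 else score
  let char_len := PySem.Str.len tag
  let score := if 10 ≤ char_len ∧ char_len ≤ 30 then score + 3 else score
  acc ++ [(tag, score)]

def rank_tags_py (tags : List String) (max_tags : Int) : List String :=
  let dedup := tags.foldl pvDedupStepA (PySem.Set.empty, [])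
  let scored_tags := dedup.2.foldl pvScoreStepA []
  let sorted_tags := PySem.List.sorted scored_tags (fun x => x.2) true
  (PySem.List.slice sorted_tags none (some max_tags)).map (fun p => p.1)

-- ===== PORT B =====
def pvKeywords : List String := ["psychedelic", "anatolian", "rock", "turkish", "70s"]
def pvScoresDesc : List Int := [18, 16, 15, 13, 10, 8, 6, 5, 3, 0]

def pvScoreB (tag : String) : Int :=
  let low := PySem.Str.lower tag
  let words := (PySem.Str.split₀ tag).length
  (if pvKeywords.any (fun kw => PySem.Str.isIn kw low) then (10 : Int) else 0)
  + (if 2 ≤ words ∧ words ≤ 3 then (5 : Int) else if words = 1 then 3 else 0)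
  + (if 10 ≤ PySem.Str.len tag ∧ PySem.Str.len tag ≤ 30 then (3 : Int) else 0)

-- B's single loop body: dedup and drop the tag into its score bucket
-- (buckets.setdefault(s, []).append(tag) ported as insert of getD ++ [tag])
def pvBucketStepB (st : PySem.Set String × PySem.Dict Int (List String)) (tag : String) :
    PySem.Set String × PySem.Dict Int (List String) :=
  let low := PySem.Str.lower tag
  if st.1.contains low then st
  else
    let s := pvScoreB tag
    (st.1.add low, st.2.insert s (st.2.getD s [] ++ [tag]))

def rank_tags_py_alt (tags : List String) (max_tags : Int) : List String :=
  let st := tags.foldl pvBucketStepB (PySem.Set.empty, PySem.Dict.empty)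
  let ranked := pvScoresDesc.foldl (fun acc s => acc ++ st.2.getD s []) []
  PySem.List.slice ranked none (some max_tags)

-- ===== PRECONDITION & SPEC =====
def Spec_rank_tags_py (tags : List String) (max_tags : Int) (out : List String) : Prop := out = rank_tags_py_alt tags max_tags
instance (tags : List String) (max_tags : Int) (out : List String) : Decidable (Spec_rank_tags_py tags max_tags out) := by unfold Spec_rank_tags_py; infer_instance

-- ===== CLAIM (what is proved, stated in full; the proofs are below) =====
def Claim_equal_rank_tags_py : Prop := ∀ (tags : List String) (max_tags : Int), Dom_rank_tags_py tags max_tags → Spec_rank_tags_py tags max_tags (rank_tags_py tags max_tags)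

-- ===== LEMMAS AND PROOFS =====

-- A's dedup bucket step over the unique list, seen from the B side
def pvDictStep (d : PySem.Dict Int (List String)) (t : String) : PySem.Dict Int (List String) :=
  d.insert (pvScoreB t) (d.getD (pvScoreB t) [] ++ [t])

lemma score_step_eq (acc : List (String × Int)) (tag : String) :
    pvScoreStepA acc tag = acc ++ [(tag, pvScoreB tag)] := by
  simp only [pvScoreStepA, pvScoreB, pvKeywords]
  split_ifs <;> norm_num

lemma score_mem (tag : String) : pvScoreB tag ∈ pvScoresDesc := by
  simp only [pvScoreB, pvScoresDesc]
  split_ifs <;> norm_num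

lemma scoredA_eq (u : List String) (acc : List (String × Int)) :
    u.foldl pvScoreStepA acc = acc ++ u.map (fun t => (t, pvScoreB t)) := by
  induction u generalizing acc with
  | nil => simp
  | cons t u ih => simp [score_step_eq, ih]

lemma dedupA_acc (tags : List String) (seen : PySem.Set String) (lst : List String) :
    tags.foldl pvDedupStepA (seen, lst)
      = ((tags.foldl pvDedupStepA (seen, [])).1,
         lst ++ (tags.foldl pvDedupStepA (seen, [])).2) := by
  induction tags generalizing seen lst with
  | nil => simp
  | cons t ts ih =>
    simp only [List.foldl_cons, pvDedupStepA]
    by_cases h : seen.contains (PySem.Str.lower t) = true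
    · rw [if_pos h, if_pos h]
      exact ih seen lst
    · rw [if_neg h, if_neg h]
      simp only [List.nil_append]
      rw [ih (seen.add (PySem.Str.lower t)) (lst ++ [t]),
          ih (seen.add (PySem.Str.lower t)) [t]]
      simp

lemma bfold_eq (tags : List String) (seen : PySem.Set String) (d : PySem.Dict Int (List String)) :
    tags.foldl pvBucketStepB (seen, d)
      = ((tags.foldl pvDedupStepA (seen, [])).1,
         (tags.foldl pvDedupStepA (seen, [])).2.foldl pvDictStep d) := by
  induction tags generalizing seen d with
  | nil => simp
  | cons t ts ih =>
    simp only [List.foldl_cons, pvBucketStepB, pvDedupStepA]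
    by_cases h : seen.contains (PySem.Str.lower t) = true
    · rw [if_pos h, if_pos h]
      exact ih seen d
    · rw [if_neg h, if_neg h]
      simp only [List.nil_append]
      rw [ih, dedupA_acc ts (seen.add (PySem.Str.lower t)) [t]]
      simp [pvDictStep]

lemma dict_getD (u : List String) (d : PySem.Dict Int (List String)) (s : Int) :
    (u.foldl pvDictStep d).getD s []
      = d.getD s [] ++ u.filter (fun t => decide (pvScoreB t = s)) := by
  induction u generalizing d with
  | nil => simp
  | cons t u ih =>
    simp only [List.foldl_cons, List.filter_cons]
    rw [ih]
    simp only [pvDictStep, PySem.Dict.getD_insert]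
    by_cases h : pvScoreB t = s
    · subst h; simp
    · simp [h, Ne.symm h]

lemma insertBy_cons {α : Type} (before : α → α → Bool) (x y : α) (ys : List α) :
    PySem.List.insertBy before x (y :: ys)
      = if before x y then x :: y :: ys else y :: PySem.List.insertBy before x ys := rfl

lemma insertBy_prefix {α : Type} (before : α → α → Bool) (x : α) (pre suf : List α)
    (h : ∀ y ∈ pre, before x y = false) :
    PySem.List.insertBy before x (pre ++ suf) = pre ++ PySem.List.insertBy before x suf := by
  induction pre with
  | nil => simp
  | cons y pre ih =>
    have hy : before x y = false := h y (by simp)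
    rw [List.cons_append, insertBy_cons, if_neg (by simp [hy]),
        ih (fun z hz => h z (by simp [hz]))]
    simp

lemma insertBy_all_true {α : Type} (before : α → α → Bool) (x : α) (suf : List α)
    (h : ∀ y ∈ suf, before x y = true) :
    PySem.List.insertBy before x suf = x :: suf := by
  cases suf with
  | nil => rfl
  | cons y ys => rw [insertBy_cons, if_pos (h y (by simp))]

lemma bucket_insert (x : String × Int) (T : List Int) (f : Int → List (String × Int))
    (hT : T.Pairwise (fun a b => b < a)) (hx : x.2 ∈ T)
    (hf : ∀ s ∈ T, ∀ p ∈ f s, p.2 = s) :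
    PySem.List.insertBy (fun a b => decide (b.2 < a.2)) x (T.flatMap f)
      = T.flatMap (fun s => f s ++ if x.2 = s then [x] else []) := by
  induction T with
  | nil => cases hx
  | cons s T ih =>
    rcases List.pairwise_cons.mp hT with ⟨hgt, hT'⟩
    simp only [List.flatMap_cons]
    by_cases hxs : x.2 = s
    · have hpre : ∀ y ∈ f s, (fun a b => decide (b.2 < a.2)) x y = false := by
        intro y hy
        have := hf s (by simp) y hy
        simp [this, hxs]
      rw [insertBy_prefix _ _ _ _ hpre]
      have hsuf : ∀ y ∈ T.flatMap f, (fun a b => decide (b.2 < a.2)) x y = true := by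
        intro y hy
        rcases List.mem_flatMap.mp hy with ⟨s', hs', hy'⟩
        have h1 := hf s' (by simp [hs']) y hy'
        have h2 := hgt s' hs'
        simp [h1, hxs]
        omega
      rw [insertBy_all_true _ _ _ hsuf]
      have hrest : T.flatMap (fun s' => f s' ++ if x.2 = s' then [x] else []) = T.flatMap f := by
        apply List.flatMap_congr
        intro s' hs'
        have : x.2 ≠ s' := by have := hgt s' hs'; omega
        simp [this]
      rw [hrest, if_pos hxs]
      simp
    · have hxT : x.2 ∈ T := by
        rcases List.mem_cons.mp hx with h | h
        · exact absurd h hxs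
        · exact h
      have hpre : ∀ y ∈ f s, (fun a b => decide (b.2 < a.2)) x y = false := by
        intro y hy
        have h1 := hf s (by simp) y hy
        have h2 : x.2 < s := hgt _ hxT
        simp [h1]; omega
      rw [insertBy_prefix _ _ _ _ hpre, ih hT' hxT (fun s' hs' => hf s' (by simp [hs'])),
          if_neg hxs]
      simp

lemma sorted_eq_flatMap (l : List (String × Int)) (h : ∀ p ∈ l, p.2 ∈ pvScoresDesc) :
    PySem.List.sorted l (fun p => p.2) true
      = pvScoresDesc.flatMap (fun s => l.filter (fun p => decide (p.2 = s))) := by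
  induction l using List.reverseRecOn with
  | nil => simp [PySem.List.sorted]
  | append_singleton l x ih =>
    rw [PySem.List.sorted_rev_eq_foldl_insertBy, List.foldl_append,
        ← PySem.List.sorted_rev_eq_foldl_insertBy]
    simp only [List.foldl_cons, List.foldl_nil]
    rw [ih (fun p hp => h p (by simp [hp]))]
    rw [bucket_insert x pvScoresDesc _ (by decide) (h x (by simp))
        (fun s _ p hp => by
          have := List.mem_filter.mp hp
          exact of_decide_eq_true this.2)]
    apply List.flatMap_congr
    intro s _
    rw [List.filter_append]
    simp [List.filter_cons]

lemma map_slice {α β : Type} (f : α → β) (xs : List α) (a b : Option Int) :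
    (PySem.List.slice xs a b).map f = PySem.List.slice (xs.map f) a b := by
  simp [PySem.List.slice, List.map_take, List.map_drop]

-- ===== VERDICT (by name: the statement is the Claim_ definition above) =====
theorem rank_tags_py_spec : Claim_equal_rank_tags_py := by
  intro tags max_tags _
  unfold Spec_rank_tags_py
  simp only [rank_tags_py, rank_tags_py_alt]
  rw [bfold_eq]
  set u := (tags.foldl pvDedupStepA (PySem.Set.empty, [])).2 with hu
  rw [scoredA_eq, List.nil_append]
  rw [sorted_eq_flatMap _ (by
    intro p hp
    rcases List.mem_map.mp hp with ⟨t, _, rfl⟩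
    exact score_mem t)]
  rw [PySem.List.foldl_append_eq_flatMap, List.nil_append]
  rw [map_slice]
  congr 1
  rw [List.map_flatMap]
  apply List.flatMap_congr
  intro s _
  rw [dict_getD, PySem.Dict.getD_empty, List.nil_append]
  rw [List.filter_map]
  rw [List.map_map]
  simp [Function.comp_def]
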